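-- pv_equiv track=rewrite | github.com/AATyukina/stm-test-task | ip_masks.py | check_mask
-- ===== SOURCE A (Python) =====
-- from typing import List, Tuple
--
-- def apply_mask(ip: list, mask: list) -> List:
--     """
--     Apply mask on IP.
--     :param ip: a list of octets in IP
--     :param mask: a list of octets in mask
--     :return: a list of octets after applying mask on IP
--     """
--
--     return [el1 & el2 for el1, el2 in zip(ip, mask)]
--
-- def check_mask(ip_list: list, mask: list) -> (None, List):
--     """
--     Function apply mask on the list of IPs and checks if the mask is correct.
--     :param ip_list: the list of IPs (e.g. [[192, 168, 3, 2], [192, 168, 1, 2]])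
--     :param mask: the list of octets in mask
--     :return: None if IP networks different, a list of ip network octets
--     """
--
--     def all_the_same(elements: list) -> bool:
--         return elements[1:] == elements[:-1]
--
--     if not ip_list:
--         return
--
--     network = []
--     for ip in ip_list:
--         network.append(apply_mask(ip, mask))
--         if not all_the_same(network):
--             return
--     return network[0]
-- ===== SOURCE B (Python) =====
-- def check_mask(ip_list, mask):
--     networks = {tuple(a & b for a, b in zip(ip, mask)) for ip in ip_list}
--     if len(networks) == 1:
--         return list(next(iter(networks)))
--     return None
-- ===== Notes on version B (the rewrite author's own statement) =====
-- stated objective: simpler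
-- what changed: Replaces the incremental list-building loop with its pairwise slice-equality check after every append by a single deduplicating set of masked networks and one cardinality test (empty input falls out of the same test).
import Mathlib
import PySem

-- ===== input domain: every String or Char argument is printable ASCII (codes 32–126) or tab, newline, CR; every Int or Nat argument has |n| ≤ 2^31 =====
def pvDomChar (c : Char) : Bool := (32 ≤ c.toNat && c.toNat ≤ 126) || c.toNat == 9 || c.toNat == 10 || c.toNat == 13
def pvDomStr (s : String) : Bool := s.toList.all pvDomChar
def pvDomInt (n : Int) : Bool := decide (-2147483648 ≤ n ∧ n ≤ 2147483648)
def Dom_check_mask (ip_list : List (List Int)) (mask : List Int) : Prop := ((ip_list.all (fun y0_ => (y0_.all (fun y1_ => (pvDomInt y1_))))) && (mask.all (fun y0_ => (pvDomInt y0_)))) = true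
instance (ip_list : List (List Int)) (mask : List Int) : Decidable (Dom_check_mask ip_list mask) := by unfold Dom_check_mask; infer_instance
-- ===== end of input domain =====

-- B replaces A's accumulate-then-recompare loop by one deduplicating set of masked
-- networks and a single cardinality test (objective: simpler).

-- ===== PORT A =====
-- apply_mask: [el1 & el2 for el1, el2 in zip(ip, mask)]
def applyMask (ip mask : List Int) : List Int :=
  (ip.zip mask).map (fun p => PySem.Int.band p.1 p.2)

-- all_the_same: elements[1:] == elements[:-1]  (xs[1:] = drop 1, xs[:-1] = dropLast; exact for these slices)
def allSame (l : List (List Int)) : Bool := decide (l.drop 1 = l.dropLast)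

-- the for-loop over ip_list with accumulator `network`
def checkLoop (mask : List Int) (network : List (List Int)) : List (List Int) → Option (List Int)
  | [] => PySem.List.pyGet? network 0        -- return network[0]
  | ip :: rest =>
      let network' := network ++ [applyMask ip mask]
      if allSame network' then checkLoop mask network' rest else none

def check_mask (ip_list : List (List Int)) (mask : List Int) : Option (List Int) :=
  if ip_list = [] then none else checkLoop mask [] ip_list

-- ===== PORT B =====
-- networks = {tuple(a & b for a, b in zip(ip, mask)) for ip in ip_list};
-- if len(networks) == 1: return list(next(iter(networks))) else None
def check_mask_alt (ip_list : List (List Int)) (mask : List Int) : Option (List Int) :=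
  let networks : PySem.Set (List Int) :=
    PySem.Set.ofList (ip_list.map (fun ip => (ip.zip mask).map (fun p => PySem.Int.band p.1 p.2)))
  if PySem.Set.len networks = 1 then networks.head? else none

-- ===== PRECONDITION & SPEC =====
def Spec_check_mask (ip_list : List (List Int)) (mask : List Int) (out : Option (List Int)) : Prop := out = check_mask_alt ip_list mask
instance (ip_list : List (List Int)) (mask : List Int) (out : Option (List Int)) : Decidable (Spec_check_mask ip_list mask out) := by unfold Spec_check_mask; infer_instance

-- ===== CLAIM (what is proved, stated in full; the proofs are below) =====
def Claim_equal_check_mask : Prop := ∀ (ip_list : List (List Int)) (mask : List Int), Dom_check_mask ip_list mask → Spec_check_mask ip_list mask (check_mask ip_list mask)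

-- ===== LEMMAS AND PROOFS =====

theorem allSame_replicate_append (k : Nat) (m v : List Int) (hk : 1 ≤ k) :
    allSame (List.replicate k m ++ [v]) = decide (v = m) := by
  obtain ⟨k', rfl⟩ : ∃ k', k = k' + 1 := ⟨k - 1, by omega⟩
  unfold allSame
  rw [show (List.replicate (k' + 1) m ++ [v]).dropLast = List.replicate (k' + 1) m by simp,
      show List.drop 1 (List.replicate (k' + 1) m ++ [v]) = List.replicate k' m ++ [v] by
        simp [List.replicate_succ],
      List.replicate_succ']
  simp

theorem checkLoop_replicate (mask m : List Int) (rest : List (List Int)) (k : Nat) (hk : 1 ≤ k) :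
    checkLoop mask (List.replicate k m) rest
      = if rest.all (fun ip => applyMask ip mask == m) then some m else none := by
  induction rest generalizing k with
  | nil =>
      obtain ⟨k', rfl⟩ : ∃ k', k = k' + 1 := ⟨k - 1, by omega⟩
      simp [checkLoop, List.replicate_succ, PySem.List.pyGet?, PySem.List.pyIdx?]
  | cons ip rest ih =>
      simp only [checkLoop, allSame_replicate_append k m _ hk]
      by_cases h : applyMask ip mask = m
      · rw [h, ← List.replicate_succ']
        simp [ih (k + 1) (by omega), h]
      · simp [h]

theorem foldl_add_const {m : List Int} (l : List (List Int)) (h : ∀ x ∈ l, x = m) :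
    l.foldl PySem.Set.add [m] = [m] := by
  induction l with
  | nil => rfl
  | cons x l ih =>
      rw [h x (by simp)] at *
      have : PySem.Set.add [m] m = [m] := by simp [PySem.Set.add, PySem.Set.contains]
      simp only [List.foldl_cons, this]
      exact ih (fun x hx => h x (by simp [hx]))

theorem check_mask_spec : Claim_equal_check_mask := by
  intro ip_list mask _
  unfold Spec_check_mask check_mask check_mask_alt
  cases ip_list with
  | nil => simp
  | cons ip0 rest =>
      simp only [reduceCtorEq, if_false]
      set m := applyMask ip0 mask with hm
      have h1 : checkLoop mask [] (ip0 :: rest)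
          = if rest.all (fun ip => applyMask ip mask == m) then some m else none := by
        have hall1 : allSame [m] = true := by simp [allSame]
        simp only [checkLoop, List.nil_append, ← hm]
        rw [hall1, if_pos rfl]
        have := checkLoop_replicate mask m rest 1 (le_refl 1)
        simpa using this
      rw [h1]
      have hmap : (ip0 :: rest).map (fun ip => (ip.zip mask).map (fun p => PySem.Int.band p.1 p.2))
          = m :: rest.map (fun ip => applyMask ip mask) := by
        simp [hm, applyMask]
      rw [hmap]
      by_cases hall : rest.all (fun ip => applyMask ip mask == m)
      · -- all masked networks equal m: the set is [m]
        have hofl : PySem.Set.ofList (m :: rest.map (fun ip => applyMask ip mask)) = [m] := by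
          rw [PySem.Set.ofList_eq_foldl]
          simp only [List.foldl_cons]
          have h0 : PySem.Set.add ([] : PySem.Set (List Int)) m = [m] := by
            simp [PySem.Set.add, PySem.Set.contains]
          rw [h0]
          apply foldl_add_const
          intro x hx
          obtain ⟨ip, hip, rfl⟩ := List.mem_map.mp hx
          have := List.all_eq_true.mp hall ip hip
          simpa using this
        simp [hall, hofl, PySem.Set.len]
      · -- some masked network differs from m: the set has ≥ 2 distinct members
        obtain ⟨ip, hip, hne⟩ : ∃ ip ∈ rest, applyMask ip mask ≠ m := by
          simpa using hall
        set s := PySem.Set.ofList (m :: rest.map (fun ip => applyMask ip mask)) with hs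
        have hm_mem : m ∈ s := by rw [hs]; exact (PySem.Set.mem_ofList _ _).mpr (by simp)
        have hx_mem : applyMask ip mask ∈ s := by
          rw [hs]; exact (PySem.Set.mem_ofList _ _).mpr (by simp; right; exact ⟨ip, hip, rfl⟩)
        have hlen : s.length ≠ 1 := by
          intro h
          obtain ⟨a, ha⟩ := List.length_eq_one_iff.mp h
          rw [ha] at hm_mem hx_mem
          simp at hm_mem hx_mem
          exact hne (hx_mem.trans hm_mem.symm)
        have : ¬ (PySem.Set.len s = 1) := by
          simp [PySem.Set.len]; omega
        rw [if_neg hall, if_neg this]
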